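-- pv_equiv track=rewrite | github.com/FredericaErath/puzzle_solver | attemptB.py | cluster_dimensions
-- ===== SOURCE A (Python) =====
-- from collections import Counter, defaultdict
--
-- def cluster_dimensions(dims, tol=8):
--     """Cluster similar dimensions together and return cluster representatives"""
--     if not dims:
--         return []
--     dims = sorted(dims)
--     clusters = []
--     current_cluster = [dims[0]]
--
--     for d in dims[1:]:
--         if d - current_cluster[0] <= tol:  # Compare with cluster start
--             current_cluster.append(d)
--         else:
--             clusters.append(current_cluster)
--             current_cluster = [d]
--     clusters.append(current_cluster)
--
--     # Return representative value for each cluster (most common, or median)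
--     result = []
--     for c in clusters:
--         counter = Counter(c)
--         most_common = counter.most_common(1)[0][0]
--         result.append(most_common)
--     return result
-- ===== SOURCE B (Python) =====
-- def cluster_dimensions(dims, tol=8):
--     """Cluster similar dimensions together and return cluster representatives"""
--     if not dims:
--         return []
--     it = iter(sorted(dims))
--     first = next(it)
--     result = []
--     cluster_start = first      # first value of the current cluster
--     run_val, run_len = first, 1    # current run of equal values
--     best_val, best_len = first, 1  # longest run so far in this cluster (earliest wins ties)
--     for d in it:
--         if d - cluster_start > tol:
--             result.append(best_val)
--             cluster_start = d
--             run_val, run_len = d, 1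
--             best_val, best_len = d, 1
--         else:
--             if d == run_val:
--                 run_len += 1
--             else:
--                 run_val, run_len = d, 1
--             if run_len > best_len:
--                 best_val, best_len = run_val, run_len
--     result.append(best_val)
--     return result
-- ===== Notes on version B (the rewrite author's own statement) =====
-- stated objective: alternative
-- what changed: Fuses clustering and representative selection into one pass over the sorted values, tracking only a running cluster start and the longest run of equal values (earliest wins ties) instead of materializing cluster lists and building a Counter per cluster.
import Mathlib
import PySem

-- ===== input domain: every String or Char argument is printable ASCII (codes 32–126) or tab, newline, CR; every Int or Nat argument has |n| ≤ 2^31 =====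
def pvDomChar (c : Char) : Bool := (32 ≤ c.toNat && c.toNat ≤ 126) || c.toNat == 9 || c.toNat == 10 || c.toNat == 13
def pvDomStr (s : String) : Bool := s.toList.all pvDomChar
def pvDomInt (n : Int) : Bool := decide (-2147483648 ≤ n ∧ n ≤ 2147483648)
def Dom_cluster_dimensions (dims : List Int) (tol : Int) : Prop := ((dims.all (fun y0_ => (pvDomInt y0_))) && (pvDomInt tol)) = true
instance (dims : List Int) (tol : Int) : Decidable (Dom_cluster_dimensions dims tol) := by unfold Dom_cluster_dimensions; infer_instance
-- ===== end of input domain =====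

-- B fuses clustering and representative selection into a single pass over the sorted
-- values with O(1) extra state (no materialized cluster lists, no per-cluster Counter).

-- ===== PORT A =====
-- counter.most_common(1)[0][0]: the FIRST key of maximal count (Counter.most_common is a
-- stable descending sort of the items by count); ported exactly as the first extremal
-- item of counter.items() by count (PySem.List.max? returns the FIRST extremal element).
-- The 'none' branch is Python's IndexError on an empty cluster; clusters are never empty.
def pvModeA (c : List Int) : Int :=
  match PySem.List.max? (PySem.Dict.counter c).items (fun kv => kv.2) with
  | some kv => kv.1
  | none => 0

def pvStepA (tol : Int) (st : List (List Int) × List Int) (d : Int) : List (List Int) × List Int :=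
  match st.2 with
  | c0 :: _ => if d - c0 ≤ tol then (st.1, st.2 ++ [d]) else (st.1 ++ [st.2], [d])
  | [] => (st.1, [d])  -- unreachable: current_cluster is never empty (Python would raise)

def cluster_dimensions (dims : List Int) (tol : Int) : List Int :=
  match PySem.List.sorted dims (fun x => x) false with
  | [] => []
  | d0 :: rest =>
    let st := rest.foldl (pvStepA tol) ([], [d0])
    let clusters := st.1 ++ [st.2]
    clusters.foldl (fun res c => res ++ [pvModeA c]) []

-- ===== PORT B =====
-- state = (result, cluster_start, run_val, run_len, best_val, best_len)
def pvStepB (tol : Int) (s : List Int × Int × Int × Int × Int × Int) (d : Int) :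
    List Int × Int × Int × Int × Int × Int :=
  let (result, cs, rv, rl, bv, bl) := s
  if tol < d - cs then (result ++ [bv], d, d, 1, d, 1)
  else
    let rr := if d = rv then (rv, rl + 1) else (d, 1)
    if bl < rr.2 then (result, cs, rr.1, rr.2, rr.1, rr.2)
    else (result, cs, rr.1, rr.2, bv, bl)

def cluster_dimensions_alt (dims : List Int) (tol : Int) : List Int :=
  match PySem.List.sorted dims (fun x => x) false with
  | [] => []
  | first :: rest =>
    let s := rest.foldl (pvStepB tol) ([], first, first, 1, first, 1)
    s.1 ++ [s.2.2.2.2.1]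

-- ===== PRECONDITION & SPEC =====
def Spec_cluster_dimensions (dims : List Int) (tol : Int) (out : List Int) : Prop := out = cluster_dimensions_alt dims tol
instance (dims : List Int) (tol : Int) (out : List Int) : Decidable (Spec_cluster_dimensions dims tol out) := by unfold Spec_cluster_dimensions; infer_instance

-- ===== CLAIM (what is proved, stated in full; the proofs are below) =====
def Claim_equal_cluster_dimensions : Prop := ∀ (dims : List Int) (tol : Int), Dom_cluster_dimensions dims tol → Spec_cluster_dimensions dims tol (cluster_dimensions dims tol)

-- ===== LEMMAS AND PROOFS =====

-- max? is a left fold over this step; an element it already holds survives a tail it dominates.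
def pvMaxStep {α κ : Type} [LT κ] [DecidableLT κ] (key : α → κ) (acc : Option α) (x : α) : Option α :=
  match acc with
  | none => some x
  | some m => if key m < key x then some x else some m

lemma pv_max?_eq_foldl {α κ : Type} [LT κ] [DecidableLT κ] (xs : List α) (key : α → κ) :
    PySem.List.max? xs key = xs.foldl (pvMaxStep key) none := rfl

lemma pv_foldl_max_keep {α κ : Type} [LinearOrder κ] (key : α → κ) (m : α) (l : List α)
    (h : ∀ y ∈ l, key y ≤ key m) :
    l.foldl (pvMaxStep key) (some m) = some m := by
  induction l with
  | nil => rfl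
  | cons y t ih =>
    have hy : ¬ key m < key y := not_lt.mpr (h y (by simp))
    simp only [List.foldl_cons, pvMaxStep, hy]
    exact ih (fun z hz => h z (by simp [hz]))

lemma pv_foldl_max_none_mem {α κ : Type} [LinearOrder κ] (key : α → κ) (l : List α) :
    l.foldl (pvMaxStep key) none = none ∨
    ∃ m ∈ l, l.foldl (pvMaxStep key) none = some m := by
  induction l using List.reverseRecOn with
  | nil => exact Or.inl rfl
  | append_singleton t y ih =>
    right
    rcases ih with h | ⟨m, hm, h⟩
    · exact ⟨y, by simp, by simp [List.foldl_append, h, pvMaxStep]⟩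
    · simp only [List.foldl_append, h, List.foldl_cons, List.foldl_nil, pvMaxStep]
      by_cases hlt : key m < key y
      · exact ⟨y, by simp, by simp [hlt]⟩
      · exact ⟨m, by simp [hm], by simp [hlt]⟩

-- FIRST extremal element: the element after a strictly-smaller prefix, dominating the suffix.
lemma pv_max?_first {α κ : Type} [LinearOrder κ] (key : α → κ) (l1 l2 : List α) (m : α)
    (h1 : ∀ y ∈ l1, key y < key m) (h2 : ∀ y ∈ l2, key y ≤ key m) :
    PySem.List.max? (l1 ++ m :: l2) key = some m := by
  rw [pv_max?_eq_foldl, List.foldl_append, List.foldl_cons]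
  rcases pv_foldl_max_none_mem key l1 with h | ⟨m1, hm1, h⟩
  · rw [h]; exact pv_foldl_max_keep key m l2 h2
  · rw [h]
    have hlt : key m1 < key m := h1 m1 hm1
    simp only [pvMaxStep, if_pos hlt]
    exact pv_foldl_max_keep key m l2 h2

-- Set.ofList keeps a subsequence of its input.
lemma pv_ofList_sublist_aux {α : Type} [BEq α] (l : List α) :
    ∀ (s pre : List α), s.Sublist pre → (l.foldl PySem.Set.add s).Sublist (pre ++ l) := by
  induction l with
  | nil => intro s pre h; simpa using h
  | cons x t ih =>
    intro s pre h
    have hadd : (PySem.Set.add s x).Sublist (pre ++ [x]) := by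
      unfold PySem.Set.add
      split
      · exact h.trans (by simp)
      · exact List.Sublist.append h (List.Sublist.refl _)
    have := ih (PySem.Set.add s x) (pre ++ [x]) hadd
    simpa [List.append_assoc] using this

lemma pv_ofList_sublist {α : Type} [BEq α] (l : List α) :
    (PySem.Set.ofList l).Sublist l := by
  have := pv_ofList_sublist_aux l PySem.Set.empty [] (by simp [PySem.Set.empty])
  simpa [PySem.Set.ofList] using this

lemma pv_ofList_pairwise_lt (c : List Int) (hp : c.Pairwise (· ≤ ·)) :
    (PySem.Set.ofList c).Pairwise (· < ·) := by
  have hle : (PySem.Set.ofList c).Pairwise (· ≤ ·) := hp.sublist (pv_ofList_sublist c)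
  have hnd : (PySem.Set.ofList c).Nodup := PySem.Set.nodup_ofList c
  have := hle.and hnd
  exact this.imp (fun {a b} h => lt_of_le_of_ne h.1 h.2)

-- pvModeA of a sorted nonempty cluster is the value of its first longest run.
lemma pv_mode_eq (c : List Int) (bv : Int) (bl : Int)
    (hp : c.Pairwise (· ≤ ·)) (hmem : bv ∈ c) (hcnt : (c.count bv : Int) = bl)
    (F1 : ∀ x ∈ c, (c.count x : Int) ≤ bl)
    (F3 : ∀ x ∈ c, (c.count x : Int) = bl → bv ≤ x) :
    pvModeA c = bv := by
  have hmemS : bv ∈ PySem.Set.ofList c := (PySem.Set.mem_ofList _ _).mpr hmem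
  obtain ⟨p, s, hsplit⟩ := List.append_of_mem hmemS
  have hplt : (PySem.Set.ofList c).Pairwise (· < ·) := pv_ofList_pairwise_lt c hp
  rw [hsplit] at hplt
  have hpre : ∀ y ∈ p, y < bv := by
    intro y hy
    have := (List.pairwise_append.mp hplt).2.2 y hy bv (by simp)
    exact this
  have hsuf : ∀ y ∈ s, bv < y := by
    have := (List.pairwise_append.mp hplt).2.1
    intro y hy
    exact (List.pairwise_cons.mp this).1 y hy
  unfold pvModeA
  rw [PySem.Dict.items_counter, hsplit]
  have hmap : (p ++ bv :: s).map (fun k => (k, (c.count k : Int)))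
      = p.map (fun k => (k, (c.count k : Int))) ++ (bv, (c.count bv : Int)) :: s.map (fun k => (k, (c.count k : Int))) := by
    simp
  rw [hmap]
  have hmemsub : ∀ y ∈ p ++ bv :: s, y ∈ c := by
    intro y hy
    rw [← hsplit] at hy
    exact (PySem.Set.mem_ofList _ _).mp hy
  have h1 : ∀ q ∈ p.map (fun k => (k, (c.count k : Int))),
      (fun kv : Int × Int => kv.2) q < (fun kv : Int × Int => kv.2) (bv, (c.count bv : Int)) := by
    intro q hq
    obtain ⟨y, hy, rfl⟩ := List.mem_map.mp hq
    have hyc : y ∈ c := hmemsub y (by simp [hy])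
    have hle := F1 y hyc
    rcases lt_or_eq_of_le hle with h | h
    · simpa [hcnt] using h
    · exact absurd (F3 y hyc h) (not_le.mpr (hpre y hy))
  have h2 : ∀ q ∈ s.map (fun k => (k, (c.count k : Int))),
      (fun kv : Int × Int => kv.2) q ≤ (fun kv : Int × Int => kv.2) (bv, (c.count bv : Int)) := by
    intro q hq
    obtain ⟨y, hy, rfl⟩ := List.mem_map.mp hq
    show ((c.count y : Int)) ≤ ((c.count bv : Int))
    exact le_trans (F1 y (hmemsub y (by simp [hy]))) (le_of_eq hcnt.symm)
  rw [pv_max?_first _ _ _ _ h1 h2]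

-- A's final loop appends one representative per cluster: it is a map.
lemma pv_foldl_snoc (l : List (List Int)) :
    ∀ acc : List Int, l.foldl (fun res c => res ++ [pvModeA c]) acc = acc ++ l.map pvModeA := by
  induction l with
  | nil => simp
  | cons c t ih => intro acc; simp [ih]

-- The fused-loop invariant: running A's fold and B's fold in parallel over a tail
-- whose elements dominate the current cluster keeps the two final answers equal.
lemma pv_main (tol : Int) (rest : List Int) :
    ∀ (clusters : List (List Int)) (cur : List Int) (result : List Int)
      (cs rv rl bv bl : Int),
      rest.Pairwise (· ≤ ·) →
      (∀ x ∈ cur, ∀ d ∈ rest, x ≤ d) →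
      cur ≠ [] →
      cur.head? = some cs →
      cur.Pairwise (· ≤ ·) →
      rv ∈ cur → (∀ x ∈ cur, x ≤ rv) → (cur.count rv : Int) = rl →
      bv ∈ cur → (cur.count bv : Int) = bl →
      (∀ x ∈ cur, (cur.count x : Int) ≤ bl) →
      (∀ x ∈ cur, (cur.count x : Int) = bl → bv ≤ x) →
      result = clusters.map pvModeA →
      (let stA := rest.foldl (pvStepA tol) (clusters, cur);
       let stB := rest.foldl (pvStepB tol) (result, cs, rv, rl, bv, bl);
       (stA.1 ++ [stA.2]).map pvModeA = stB.1 ++ [stB.2.2.2.2.1]) := by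
  induction rest with
  | nil =>
    intro clusters cur result cs rv rl bv bl _ _ hne _ hp _ _ _ hbmem hbcnt F1 F3 hres
    simp only [List.foldl_nil]
    have : pvModeA cur = bv := pv_mode_eq cur bv bl hp hbmem hbcnt F1 F3
    simp [hres, this]
  | cons d rest ih =>
    intro clusters cur result cs rv rl bv bl hsorted hdom hne hhead hp hrmem hrmax hrcnt hbmem hbcnt F1 F3 hres
    obtain ⟨ct, rfl⟩ : ∃ ct, cur = cs :: ct := by
      cases cur with
      | nil => exact absurd rfl hne
      | cons a b =>
        simp only [List.head?_cons, Option.some.injEq] at hhead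
        exact ⟨b, by rw [hhead]⟩
    have hsorted' : rest.Pairwise (· ≤ ·) := hsorted.of_cons
    have hdle : ∀ e ∈ rest, d ≤ e := fun e he => (List.pairwise_cons.mp hsorted).1 e he
    have hcurd : ∀ x ∈ (cs :: ct), x ≤ d := fun x hx => hdom x hx d (by simp)
    simp only [List.foldl_cons]
    by_cases hflush : tol < d - cs
    · -- new cluster
      have hstepA : pvStepA tol (clusters, cs :: ct) d = (clusters ++ [cs :: ct], [d]) := by
        unfold pvStepA; simp only []
        rw [if_neg (by omega : ¬ d - cs ≤ tol)]
      have hstepB : pvStepB tol (result, cs, rv, rl, bv, bl) d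
          = (result ++ [bv], d, d, 1, d, 1) := by
        unfold pvStepB; simp [hflush]
      rw [hstepA, hstepB]
      have hmode : pvModeA (cs :: ct) = bv := pv_mode_eq _ bv bl hp hbmem hbcnt F1 F3
      exact ih (clusters ++ [cs :: ct]) [d] (result ++ [bv]) d d 1 d 1
        hsorted' (by intro x hx e he; simp at hx; subst hx; exact hdle e he)
        (by simp) (by simp) (by simp)
        (by simp) (by simp) (by simp)
        (by simp) (by simp)
        (by intro x hx; simp at hx; subst hx; simp)
        (by intro x hx _; simp at hx; omega)
        (by simp [hres, hmode])
    · -- extend current cluster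
      have hle : d - cs ≤ tol := not_lt.mp hflush
      have hstepA : pvStepA tol (clusters, cs :: ct) d = (clusters, (cs :: ct) ++ [d]) := by
        unfold pvStepA; simp [hle]
      rw [hstepA]
      have hrv_le_d : rv ≤ d := hcurd rv hrmem
      have hbv_le_d : bv ≤ d := hcurd bv hbmem
      have hcount_ne : d ≠ rv → d ∉ (cs :: ct) := by
        intro hdne hdin
        exact hdne (le_antisymm (hrmax d hdin) hrv_le_d)
      have hcnt_app : ∀ x : Int, (((cs :: ct) ++ [d]).count x : Int)
          = ((cs :: ct).count x : Int) + if d = x then 1 else 0 := by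
        intro x
        by_cases hxd : d = x <;>
          · rw [List.count_append]
            simp [hxd]
      have hp' : ((cs :: ct) ++ [d]).Pairwise (· ≤ ·) := by
        rw [List.pairwise_append]
        exact ⟨hp, by simp, fun x hx y hy => by simp at hy; subst hy; exact hcurd x hx⟩
      have hmem' : ∀ x : Int, x ∈ (cs :: ct) ++ [d] ↔ x ∈ (cs :: ct) ∨ x = d := by
        intro x; rw [List.mem_append]; simp
      set rv' : Int := if d = rv then rv else d with hrv'
      set rl' : Int := if d = rv then rl + 1 else 1 with hrl'
      have hrveq : rv' = d := by by_cases h : d = rv <;> simp [hrv', h]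
      have hrr : (if d = rv then (rv, rl + 1) else (d, 1)) = (rv', rl') := by
        by_cases h : d = rv <;> simp [hrv', hrl', h]
      have hcdc : ((cs :: ct).count d : Int) = rl' - 1 := by
        by_cases h : d = rv
        · rw [← h] at hrcnt
          rw [hrl', if_pos h]
          omega
        · simp [hrl', h, List.count_eq_zero_of_not_mem (hcount_ne h)]
      have hrcnt' : ((((cs :: ct) ++ [d]).count rv' : Int)) = rl' := by
        rw [hrveq, hcnt_app, if_pos rfl, hcdc]; ring
      have hrmax' : ∀ x ∈ (cs :: ct) ++ [d], x ≤ rv' := by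
        intro x hx
        rw [hrveq]
        rcases (hmem' x).mp hx with hx | hx
        · exact hcurd x hx
        · omega
      have hF1' : ∀ x ∈ (cs :: ct) ++ [d], (((cs :: ct) ++ [d]).count x : Int) ≤ max bl rl' := by
        intro x hx
        rw [hcnt_app]
        by_cases hxd : d = x
        · subst hxd
          rw [if_pos rfl, hcdc]
          omega
        · rw [if_neg hxd]
          rcases (hmem' x).mp hx with hx | hx
          · have := F1 x hx; omega
          · exact absurd hx.symm hxd
      by_cases hbest : bl < rl'
      · -- run becomes new best
        have hstepB : pvStepB tol (result, cs, rv, rl, bv, bl) d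
            = (result, cs, rv', rl', rv', rl') := by
          simp only [pvStepB, if_neg hflush, hrr]
          rw [if_pos hbest]
        rw [hstepB]
        refine ih clusters ((cs :: ct) ++ [d]) result cs rv' rl' rv' rl'
          hsorted'
          (by intro x hx e he
              rcases (hmem' x).mp hx with hx | hx
              · exact le_trans (hcurd x hx) (hdle e he)
              · subst hx; exact hdle e he)
          (by simp) (by simp) hp'
          (by rw [hrveq]; exact (hmem' d).mpr (Or.inr rfl)) hrmax' hrcnt'
          (by rw [hrveq]; exact (hmem' d).mpr (Or.inr rfl)) hrcnt'
          ?_ ?_ hres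
        · intro x hx
          have := hF1' x hx
          omega
        · intro x hx hxc
          rw [hrveq]
          by_cases hxd : d = x
          · omega
          · exfalso
            rw [hcnt_app, if_neg hxd] at hxc
            rcases (hmem' x).mp hx with hx | hx
            · have := F1 x hx; omega
            · exact hxd hx.symm
      · -- best unchanged
        have hstepB : pvStepB tol (result, cs, rv, rl, bv, bl) d
            = (result, cs, rv', rl', bv, bl) := by
          simp only [pvStepB, if_neg hflush, hrr]
          rw [if_neg hbest]
        rw [hstepB]
        have hble : rl' ≤ bl := not_lt.mp hbest
        have hbvd : bv ≠ d := by
          intro h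
          rw [← h] at hcdc
          have := F1 bv hbmem
          omega
        refine ih clusters ((cs :: ct) ++ [d]) result cs rv' rl' bv bl
          hsorted'
          (by intro x hx e he
              rcases (hmem' x).mp hx with hx | hx
              · exact le_trans (hcurd x hx) (hdle e he)
              · subst hx; exact hdle e he)
          (by simp) (by simp) hp'
          (by rw [hrveq]; exact (hmem' d).mpr (Or.inr rfl)) hrmax' hrcnt'
          ((hmem' bv).mpr (Or.inl hbmem))
          (by rw [hcnt_app, if_neg (fun h => hbvd h.symm)]; omega)
          ?_ ?_ hres
        · intro x hx
          have := hF1' x hx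
          omega
        · intro x hx hxc
          by_cases hxd : d = x
          · subst hxd; exact hbv_le_d
          · rw [hcnt_app, if_neg hxd] at hxc
            rcases (hmem' x).mp hx with hx | hx
            · exact F3 x hx (by omega)
            · exact absurd hx.symm hxd

-- ===== VERDICT (by name: the statement is the Claim_ definition above) =====
theorem cluster_dimensions_spec : Claim_equal_cluster_dimensions := by
  intro dims tol _
  unfold Spec_cluster_dimensions cluster_dimensions cluster_dimensions_alt
  cases hs : PySem.List.sorted dims (fun x => x) false with
  | nil => rfl
  | cons d0 rest =>
    dsimp only
    have hsorted : (d0 :: rest).Pairwise (· ≤ ·) := by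
      have := PySem.List.sorted_pairwise dims (fun x => x)
      rw [hs] at this
      exact this
    rw [pv_foldl_snoc]
    have := pv_main tol rest [] [d0] [] d0 d0 1 d0 1
      hsorted.of_cons
      (by intro x hx e he; simp at hx; subst hx
          exact (List.pairwise_cons.mp hsorted).1 e he)
      (by simp) (by simp) (by simp)
      (by simp) (by simp) (by simp)
      (by simp) (by simp)
      (by intro x hx; simp at hx; subst hx; simp)
      (by intro x hx _; simp at hx; omega)
      (by simp)
    simpa using this
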